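-- pv_equiv track=rewrite | github.com/tiendm1991/python | leetcode/contest/weekly-217/Contest3.py | minMoves_slow
-- ===== SOURCE A (Python) =====
-- def minMoves_slow(nums, limit: int) -> int:
--     n = len(nums)
--     if n == 2:
--         return 0
--     d = {}
--     for i in range(n // 2):
--         x = nums[i] + nums[n - 1 - i]
--         d[x] = d.get(x, 0) + 1
--     s = []
--     for k in d:
--         if not s or d[k] > d[s[0]]:
--             s = [k]
--         elif d[k] == d[s[0]]:
--             s.append(k)
--     res = n
--     for target in s:
--         tmp = 0
--         for i in range(n // 2):
--             if nums[i] + nums[n - 1 - i] > target: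
--                 if min(nums[i], nums[n - 1 - i]) + 1 > target:
--                     tmp += 2
--                 else:
--                     tmp += 1
--             elif nums[i] + nums[n - 1 - i] < target:
--                 if max(nums[i], nums[n - 1 - i]) + limit < target:
--                     tmp += 2
--                 else:
--                     tmp += 1
--         res = min(res, tmp)
--     return res
-- ===== SOURCE B (Python) =====
-- def _count_lt(a, x):
--     # number of elements of sorted list a that are < x (CPython's bisect_left algorithm)
--     lo, hi = 0, len(a)
--     while lo < hi:
--         mid = (lo + hi) // 2
--         if a[mid] < x:
--             lo = mid + 1
--         else:
--             hi = mid
--     return lo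
--
--
-- def minMoves_slow(nums, limit: int) -> int:
--     n = len(nums)
--     m = n // 2
--     cnt = {}
--     los = []
--     his = []
--     for i in range(m):
--         a, b = nums[i], nums[n - 1 - i]
--         s = a + b
--         cnt[s] = cnt.get(s, 0) + 1
--         los.append(min(s, min(a, b) + 1))
--         his.append(max(s, max(a, b) + limit))
--     if not cnt:
--         return n
--     best = max(cnt.values())
--     los.sort()
--     his.sort()
--     res = n
--     for t, c in cnt.items():
--         if c == best:
--             cost = (m - c) + (m - _count_lt(los, t + 1)) + _count_lt(his, t)
--             res = min(res, cost)
--     return res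
-- ===== Notes on version B (the rewrite author's own statement) =====
-- stated objective: alternative
-- what changed: Instead of rescanning all pairs for every max-frequency candidate sum, B makes one pass computing each pair's sum, lower threshold min(sum,min+1) and upper threshold max(sum,max+limit), sorts the two threshold lists once, and obtains each candidate's cost as (pairs - count[t]) plus two binary-search rank lookups; it trades A's per-candidate rescans for an upfront sort.
import Mathlib
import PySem

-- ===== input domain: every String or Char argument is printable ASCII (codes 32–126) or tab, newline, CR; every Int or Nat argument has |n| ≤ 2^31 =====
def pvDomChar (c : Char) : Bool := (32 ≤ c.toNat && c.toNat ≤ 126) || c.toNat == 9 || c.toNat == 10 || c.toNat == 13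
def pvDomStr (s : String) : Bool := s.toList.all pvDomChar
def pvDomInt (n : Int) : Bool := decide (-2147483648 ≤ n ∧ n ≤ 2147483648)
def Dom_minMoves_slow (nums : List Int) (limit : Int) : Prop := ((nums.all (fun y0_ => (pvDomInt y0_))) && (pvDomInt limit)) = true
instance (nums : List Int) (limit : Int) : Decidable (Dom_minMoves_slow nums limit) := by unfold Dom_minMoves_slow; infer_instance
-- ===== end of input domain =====

-- B replaces A's per-candidate rescan of all pairs by one pass over the pairs plus two
-- sorted threshold lists and binary-search counting (objective: alternative algorithm).

-- ===== PORT A =====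
-- A's first loop: d[x] = d.get(x, 0) + 1 over the pair sums (indices always in range, so pyGetD is exact)
def aDict (nums : List Int) (n : Int) : PySem.Dict Int Int :=
  (PySem.List.pyRange 0 (PySem.Int.floordiv n 2) 1).foldl
    (fun d i =>
      let x := PySem.List.pyGetD nums i 0 + PySem.List.pyGetD nums (n - 1 - i) 0
      d.insert x (d.getD x 0 + 1))
    PySem.Dict.empty

-- A's second loop: s = keys of maximal count (d[k] is always present, so getD is exact)
def aSelect (d : PySem.Dict Int Int) : List Int :=
  d.keys.foldl
    (fun s k =>
      match s with
      | [] => [k]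
      | s0 :: _ =>
        if d.getD k 0 > d.getD s0 0 then [k]
        else if d.getD k 0 = d.getD s0 0 then s ++ [k]
        else s)
    []

-- A's inner loop: tmp for one target
def aCost (nums : List Int) (limit n target : Int) : Int :=
  (PySem.List.pyRange 0 (PySem.Int.floordiv n 2) 1).foldl
    (fun tmp i =>
      let a := PySem.List.pyGetD nums i 0
      let b := PySem.List.pyGetD nums (n - 1 - i) 0
      if a + b > target then (if min a b + 1 > target then tmp + 2 else tmp + 1)
      else if a + b < target then (if max a b + limit < target then tmp + 2 else tmp + 1)
      else tmp)
    0

def minMoves_slow (nums : List Int) (limit : Int) : Int :=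
  let n := PySem.List.len nums
  if n = 2 then 0
  else
    let d := aDict nums n
    (aSelect d).foldl (fun res target => min res (aCost nums limit n target)) n

-- ===== PORT B =====
-- Source B's single pass: counter of pair sums, and the two threshold lists (indices always in range)
def bScan (nums : List Int) (limit n : Int) : PySem.Dict Int Int × List Int × List Int :=
  (PySem.List.pyRange 0 (PySem.Int.floordiv n 2) 1).foldl
    (fun st i =>
      let a := PySem.List.pyGetD nums i 0
      let b := PySem.List.pyGetD nums (n - 1 - i) 0
      let s := a + b
      (st.1.insert s (st.1.getD s 0 + 1),
       st.2.1 ++ [min s (min a b + 1)],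
       st.2.2 ++ [max s (max a b + limit)]))
    (PySem.Dict.empty, [], [])

-- Source B's _count_lt is verbatim CPython's bisect_left loop; ported exactly as PySem.List.bisectLeft
def minMoves_slow_alt (nums : List Int) (limit : Int) : Int :=
  let n := PySem.List.len nums
  let m := PySem.Int.floordiv n 2
  let st := bScan nums limit n
  if st.1.items = [] then n
  else
    let best := (PySem.List.max? st.1.values (fun x => x)).getD 0
    let los := PySem.List.sorted st.2.1 (fun x => x) false
    let his := PySem.List.sorted st.2.2 (fun x => x) false
    st.1.items.foldl
      (fun res tc =>
        if tc.2 = best then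
          min res ((m - tc.2) + (m - (PySem.List.bisectLeft los (tc.1 + 1) : Int))
                   + (PySem.List.bisectLeft his tc.1 : Int))
        else res)
      n

-- ===== PRECONDITION & SPEC =====
def Spec_minMoves_slow (nums : List Int) (limit : Int) (out : Int) : Prop := out = minMoves_slow_alt nums limit
instance (nums : List Int) (limit : Int) (out : Int) : Decidable (Spec_minMoves_slow nums limit out) := by unfold Spec_minMoves_slow; infer_instance

-- ===== CLAIM (what is proved, stated in full; the proofs are below) =====
def Claim_equal_minMoves_slow : Prop := ∀ (nums : List Int) (limit : Int), Dom_minMoves_slow nums limit → Spec_minMoves_slow nums limit (minMoves_slow nums limit)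

-- ===== LEMMAS AND PROOFS =====

-- Nat-indexed views of what both loops compute, pair by pair
def sumAt (nums : List Int) (k : Nat) : Int :=
  nums.getD k 0 + nums.getD (nums.length - 1 - k) 0
def loAt (nums : List Int) (k : Nat) : Int :=
  min (sumAt nums k) (min (nums.getD k 0) (nums.getD (nums.length - 1 - k) 0) + 1)
def hiAt (nums : List Int) (limit : Int) (k : Nat) : Int :=
  max (sumAt nums k) (max (nums.getD k 0) (nums.getD (nums.length - 1 - k) 0) + limit)
def sumsOf (nums : List Int) : List Int := (List.range (nums.length / 2)).map (sumAt nums)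
def losOf (nums : List Int) : List Int := (List.range (nums.length / 2)).map (loAt nums)
def hisOf (nums : List Int) (limit : Int) : List Int := (List.range (nums.length / 2)).map (hiAt nums limit)
def cOf (nums : List Int) (t : Int) : Int := (List.count t (sumsOf nums) : Int)
def bCost (nums : List Int) (limit t : Int) : Int :=
  (((nums.length / 2 : Nat) : Int) - cOf nums t)
  + (((nums.length / 2 : Nat) : Int)
     - (PySem.List.bisectLeft (PySem.List.sorted (losOf nums) (fun x => x) false) (t + 1) : Int))
  + (PySem.List.bisectLeft (PySem.List.sorted (hisOf nums limit) (fun x => x) false) t : Int)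

-- the step of A's selection loop, abstracted over the count function
def selStep (c : Int → Int) (s : List Int) (k : Int) : List Int :=
  match s with
  | [] => [k]
  | s0 :: _ =>
    if c k > c s0 then [k]
    else if c k = c s0 then s ++ [k]
    else s

def maxAcc (c : Int → Int) (m : Int) (ks : List Int) : Int :=
  ks.foldl (fun a k => max a (c k)) m

lemma floordiv_cast (nums : List Int) :
    PySem.Int.floordiv ((nums.length : Int)) 2 = ((nums.length / 2 : Nat) : Int) := by
  exact_mod_cast PySem.Int.floordiv_natCast nums.length 2

lemma idx2_cast (nums : List Int) (k : Nat) (hk : k < nums.length / 2) :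
    ((nums.length : Int) - 1 - (k : Int)) = ((nums.length - 1 - k : Nat) : Int) := by
  omega

lemma foldl_triple {α δ : Type} (f : δ → α → δ) (g h : α → Int) :
    ∀ (l : List α) (d : δ) (ls hs : List Int),
      l.foldl (fun st i => (f st.1 i, st.2.1 ++ [g i], st.2.2 ++ [h i])) (d, ls, hs)
        = (l.foldl f d, ls ++ l.map g, hs ++ l.map h) := by
  intro l
  induction l with
  | nil => simp
  | cons x xs ih => intro d ls hs; simp [ih, List.append_assoc]

lemma counter_insert_fold (xs : List Int) :
    xs.foldl (fun d x => d.insert x (d.getD x 0 + 1)) PySem.Dict.empty = PySem.Dict.counter xs := by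
  rw [PySem.Dict.counter_eq_foldl]
  rfl

lemma map_pair_sum (nums : List Int) :
    ((List.range (nums.length / 2)).map (fun k : Nat => (k : Int))).map
      (fun i => PySem.List.pyGetD nums i 0 + PySem.List.pyGetD nums ((nums.length : Int) - 1 - i) 0)
      = sumsOf nums := by
  rw [List.map_map]
  unfold sumsOf
  apply List.map_congr_left
  intro k hk
  simp only [List.mem_range] at hk
  simp only [Function.comp_apply]
  rw [idx2_cast nums k hk]
  simp [sumAt]

lemma map_pair_lo (nums : List Int) :
    ((List.range (nums.length / 2)).map (fun k : Nat => (k : Int))).map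
      (fun i => min (PySem.List.pyGetD nums i 0 + PySem.List.pyGetD nums ((nums.length : Int) - 1 - i) 0)
        (min (PySem.List.pyGetD nums i 0) (PySem.List.pyGetD nums ((nums.length : Int) - 1 - i) 0) + 1))
      = losOf nums := by
  rw [List.map_map]
  unfold losOf
  apply List.map_congr_left
  intro k hk
  simp only [List.mem_range] at hk
  simp only [Function.comp_apply]
  rw [idx2_cast nums k hk]
  simp [loAt, sumAt]

lemma map_pair_hi (nums : List Int) (limit : Int) :
    ((List.range (nums.length / 2)).map (fun k : Nat => (k : Int))).map
      (fun i => max (PySem.List.pyGetD nums i 0 + PySem.List.pyGetD nums ((nums.length : Int) - 1 - i) 0)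
        (max (PySem.List.pyGetD nums i 0) (PySem.List.pyGetD nums ((nums.length : Int) - 1 - i) 0) + limit))
      = hisOf nums limit := by
  rw [List.map_map]
  unfold hisOf
  apply List.map_congr_left
  intro k hk
  simp only [List.mem_range] at hk
  simp only [Function.comp_apply]
  rw [idx2_cast nums k hk]
  simp [hiAt, sumAt]

lemma aDict_eq (nums : List Int) :
    aDict nums ((nums.length : Int)) = PySem.Dict.counter (sumsOf nums) := by
  unfold aDict
  rw [floordiv_cast, PySem.List.pyRange_zero_natCast]
  rw [← map_pair_sum nums, ← counter_insert_fold]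
  exact (List.foldl_map
    (f := fun i => PySem.List.pyGetD nums i 0 + PySem.List.pyGetD nums ((nums.length : Int) - 1 - i) 0)
    (g := fun (d : PySem.Dict Int Int) x => d.insert x (d.getD x 0 + 1))).symm

lemma bScan_eq (nums : List Int) (limit : Int) :
    bScan nums limit ((nums.length : Int))
      = (PySem.Dict.counter (sumsOf nums), losOf nums, hisOf nums limit) := by
  unfold bScan
  rw [floordiv_cast, PySem.List.pyRange_zero_natCast]
  refine Eq.trans (foldl_triple
      (fun (d : PySem.Dict Int Int) (i : Int) =>
        d.insert (PySem.List.pyGetD nums i 0 + PySem.List.pyGetD nums ((nums.length : Int) - 1 - i) 0)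
          (d.getD (PySem.List.pyGetD nums i 0 + PySem.List.pyGetD nums ((nums.length : Int) - 1 - i) 0) 0 + 1))
      (fun i => min (PySem.List.pyGetD nums i 0 + PySem.List.pyGetD nums ((nums.length : Int) - 1 - i) 0)
        (min (PySem.List.pyGetD nums i 0) (PySem.List.pyGetD nums ((nums.length : Int) - 1 - i) 0) + 1))
      (fun i => max (PySem.List.pyGetD nums i 0 + PySem.List.pyGetD nums ((nums.length : Int) - 1 - i) 0)
        (max (PySem.List.pyGetD nums i 0) (PySem.List.pyGetD nums ((nums.length : Int) - 1 - i) 0) + limit))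
      _ _ _ _) ?_
  rw [List.nil_append, List.nil_append]
  simp only [Prod.mk.injEq]
  refine ⟨?_, ?_, ?_⟩
  · rw [← map_pair_sum nums, ← counter_insert_fold]
    exact (List.foldl_map
      (f := fun i => PySem.List.pyGetD nums i 0 + PySem.List.pyGetD nums ((nums.length : Int) - 1 - i) 0)
      (g := fun (d : PySem.Dict Int Int) x => d.insert x (d.getD x 0 + 1))).symm
  · exact map_pair_lo nums
  · exact map_pair_hi nums limit

lemma seed_le_maxAcc (c : Int → Int) : ∀ (ks : List Int) (m : Int), m ≤ maxAcc c m ks := by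
  intro ks
  induction ks with
  | nil => intro m; simp [maxAcc]
  | cons k ks ih =>
    intro m
    calc m ≤ max m (c k) := le_max_left _ _
    _ ≤ maxAcc c (max m (c k)) ks := ih _
    _ = maxAcc c m (k :: ks) := rfl

lemma sel_char (c : Int → Int) :
    ∀ (ks s : List Int) (m : Int), s ≠ [] → (∀ x ∈ s, c x = m) →
      ks.foldl (selStep c) s = (s ++ ks).filter (fun k => decide (c k = maxAcc c m ks)) := by
  intro ks
  induction ks with
  | nil =>
    intro s m hne hall
    simp only [List.foldl_nil, List.append_nil, maxAcc, List.foldl_nil]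
    refine (List.filter_eq_self.2 ?_).symm
    intro a ha
    simp [hall a ha]
  | cons k ks ih =>
    intro s m hne hall
    obtain ⟨s0, s', rfl⟩ := List.exists_cons_of_ne_nil hne
    have hcs0 : c s0 = m := hall s0 (by simp)
    rw [List.foldl_cons]
    rcases lt_trichotomy m (c k) with hlt | heq | hgt
    · have hstep : selStep c (s0 :: s') k = [k] := by
        simp [selStep, hcs0, hlt]
      have hmx : maxAcc c m (k :: ks) = maxAcc c (c k) ks := by
        show maxAcc c (max m (c k)) ks = _
        rw [max_eq_right (le_of_lt hlt)]
      have hdropped : (s0 :: s').filter (fun k' => decide (c k' = maxAcc c (c k) ks)) = [] := by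
        apply List.filter_eq_nil_iff.2
        intro a ha
        have ha' : c a = m := hall a ha
        have hle := seed_le_maxAcc c ks (c k)
        simp only [decide_eq_true_eq]
        omega
      rw [hstep, ih [k] (c k) (by simp) (by simp), hmx]
      conv_rhs => rw [List.filter_append]
      rw [hdropped, List.nil_append]
      rfl
    · have hstep : selStep c (s0 :: s') k = (s0 :: s') ++ [k] := by
        simp [selStep, hcs0, ← heq]
      rw [hstep, ih ((s0 :: s') ++ [k]) m (by simp) ?hall2]
      case hall2 =>
        intro x hx
        rcases List.mem_append.1 hx with hx1 | hx2
        · exact hall x hx1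
        · simp only [List.mem_singleton] at hx2
          rw [hx2, ← heq]
      have hmx : maxAcc c m (k :: ks) = maxAcc c m ks := by
        show maxAcc c (max m (c k)) ks = _
        rw [← heq, max_self]
      rw [hmx]
      congr 1
      simp [List.append_assoc]
    · have hstep : selStep c (s0 :: s') k = s0 :: s' := by
        show (if c k > c s0 then [k] else if c k = c s0 then (s0 :: s') ++ [k] else s0 :: s') = s0 :: s'
        rw [if_neg (by omega), if_neg (by omega)]
      have hmx : maxAcc c m (k :: ks) = maxAcc c m ks := by
        show maxAcc c (max m (c k)) ks = _
        rw [max_eq_left (le_of_lt hgt)]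
      have hkfail : (decide (c k = maxAcc c m ks)) = false := by
        have hle := seed_le_maxAcc c ks m
        simp only [decide_eq_false_iff_not]
        omega
      have hkdrop : List.filter (fun x => decide (c x = maxAcc c m ks)) (k :: ks)
          = List.filter (fun x => decide (c x = maxAcc c m ks)) ks := by
        simp [hkfail]
      rw [hstep, ih (s0 :: s') m hne hall, hmx]
      conv_rhs => rw [List.filter_append, hkdrop]
      rw [List.filter_append]

lemma sel_main (c : Int → Int) (k0 : Int) (rest : List Int) :
    (k0 :: rest).foldl (selStep c) []
      = (k0 :: rest).filter (fun k => decide (c k = maxAcc c (c k0) rest)) := by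
  have h := sel_char c rest [k0] (c k0) (by simp) (by simp)
  rw [List.foldl_cons]
  exact h

lemma bisect_countP (xs : List Int) (x : Int) (h : List.Pairwise (· ≤ ·) xs) :
    PySem.List.bisectLeft xs x = xs.countP (fun a => decide (a < x)) := by
  obtain ⟨hk, hlt, hge⟩ := PySem.List.bisectLeft_spec xs x h
  have htake : (xs.take (PySem.List.bisectLeft xs x)).countP (fun a => decide (a < x))
      = PySem.List.bisectLeft xs x := by
    have hlen : (xs.take (PySem.List.bisectLeft xs x)).length = PySem.List.bisectLeft xs x := by
      simp [List.length_take]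
      omega
    have hall : ∀ a ∈ xs.take (PySem.List.bisectLeft xs x), (fun a => decide (a < x)) a = true := by
      intro a ha
      obtain ⟨i, hi, rfl⟩ := List.getElem_of_mem ha
      have hik : i < PySem.List.bisectLeft xs x := by omega
      rw [List.getElem_take]
      exact decide_eq_true (hlt i (by simp at hi; omega) hik)
    rw [List.countP_eq_length.2 hall, hlen]
  have hdrop : (xs.drop (PySem.List.bisectLeft xs x)).countP (fun a => decide (a < x)) = 0 := by
    apply List.countP_eq_zero.2
    intro a ha
    obtain ⟨i, hi, rfl⟩ := List.getElem_of_mem ha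
    rw [List.getElem_drop]
    have hx := hge (PySem.List.bisectLeft xs x + i) (by simp at hi; omega) (by omega)
    simp only [decide_eq_true_eq]
    omega
  conv_rhs => rw [← List.take_append_drop (PySem.List.bisectLeft xs x) xs]
  rw [List.countP_append, htake, hdrop]
  omega

lemma max?_go (vs : List Int) (f : Option Int → Int → Option Int)
    (hf : ∀ c x, f (some c) x = if c < x then some x else some c) :
    ∀ (m : Int), vs.foldl f (some m) = some (vs.foldl max m) := by
  induction vs with
  | nil => intro m; simp
  | cons x xs ih =>
    intro m
    simp only [List.foldl_cons, hf]
    by_cases h : m < x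
    · rw [if_pos h, ih, max_eq_right (le_of_lt h)]
    · rw [if_neg h, ih, max_eq_left (not_lt.1 h)]

lemma max?_cons (v0 : Int) (vs : List Int) :
    PySem.List.max? (v0 :: vs) (fun x => x) = some (vs.foldl max v0) := by
  unfold PySem.List.max?
  rw [List.foldl_cons]
  exact max?_go vs _ (fun c x => rfl) v0

lemma cost_body (a b t limit tmp : Int) :
    (if a + b > t then (if min a b + 1 > t then tmp + 2 else tmp + 1)
     else if a + b < t then (if max a b + limit < t then tmp + 2 else tmp + 1) else tmp)
    = tmp + ((if a + b ≠ t then (1:Int) else 0)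
             + (if t < min (a + b) (min a b + 1) then 1 else 0)
             + (if max (a + b) (max a b + limit) < t then 1 else 0)) := by
  split_ifs <;> omega

lemma foldl_count3 {α : Type} (p q r : α → Prop) [DecidablePred p] [DecidablePred q] [DecidablePred r] :
    ∀ (l : List α) (a : Int),
      l.foldl (fun acc x => acc + ((if p x then (1:Int) else 0) + (if q x then 1 else 0) + (if r x then 1 else 0))) a
        = a + (l.countP (fun x => decide (p x)) : Int) + (l.countP (fun x => decide (q x)) : Int)
            + (l.countP (fun x => decide (r x)) : Int) := by
  intro l
  induction l with
  | nil => intro a; simp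
  | cons x xs ih =>
    intro a
    simp only [List.foldl_cons, List.countP_cons, ih]
    by_cases hp : p x <;> by_cases hq : q x <;> by_cases hr : r x <;>
      simp [hp, hq, hr] <;> omega

lemma aCost_eq (nums : List Int) (limit t : Int) :
    aCost nums limit ((nums.length : Int)) t = bCost nums limit t := by
  unfold aCost
  rw [floordiv_cast, PySem.List.pyRange_zero_natCast, List.foldl_map]
  rw [PySem.List.foldl_congr_mem (List.range (nums.length / 2)) _
    (fun tmp k => tmp + ((if sumAt nums k ≠ t then (1:Int) else 0)
      + (if t < loAt nums k then 1 else 0)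
      + (if hiAt nums limit k < t then 1 else 0))) 0 ?hcong]
  case hcong =>
    intro acc k hk
    simp only [List.mem_range] at hk
    show (if PySem.List.pyGetD nums (k : Int) 0 + PySem.List.pyGetD nums ((nums.length : Int) - 1 - (k : Int)) 0 > t
        then (if min (PySem.List.pyGetD nums (k : Int) 0) (PySem.List.pyGetD nums ((nums.length : Int) - 1 - (k : Int)) 0) + 1 > t then acc + 2 else acc + 1)
        else if PySem.List.pyGetD nums (k : Int) 0 + PySem.List.pyGetD nums ((nums.length : Int) - 1 - (k : Int)) 0 < t
        then (if max (PySem.List.pyGetD nums (k : Int) 0) (PySem.List.pyGetD nums ((nums.length : Int) - 1 - (k : Int)) 0) + limit < t then acc + 2 else acc + 1)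
        else acc) = _
    rw [idx2_cast nums k hk]
    simp only [PySem.List.pyGetD_natCast]
    simp only [sumAt, loAt, hiAt]
    have := cost_body (nums.getD k 0) (nums.getD (nums.length - 1 - k) 0) t limit acc
    rw [this]
    rfl
  refine Eq.trans (foldl_count3 (fun k => sumAt nums k ≠ t) (fun k => t < loAt nums k)
    (fun k => hiAt nums limit k < t) (List.range (nums.length / 2)) 0) ?_
  simp only [ne_eq, decide_not]
  have hsum : (List.range (nums.length / 2)).countP (fun k => !(decide (sumAt nums k = t)))
      + (sumsOf nums).count t = nums.length / 2 := by
    have h1 : (sumsOf nums).count t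
        = (List.range (nums.length / 2)).countP (fun k => decide (sumAt nums k = t)) := by
      unfold sumsOf
      rw [List.count_eq_countP, List.countP_map]
      apply List.countP_congr
      intro k _
      simp
    have h2 : (List.range (nums.length / 2)).countP (fun k => decide (sumAt nums k = t))
        + (List.range (nums.length / 2)).countP (fun k => !(decide (sumAt nums k = t)))
        = nums.length / 2 := by
      simpa using (List.length_eq_countP_add_countP (p := fun k => decide (sumAt nums k = t))
        (l := List.range (nums.length / 2))).symm
    omega
  have hlo : PySem.List.bisectLeft (PySem.List.sorted (losOf nums) (fun x => x) false) (t + 1)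
      + (List.range (nums.length / 2)).countP (fun k => decide (t < loAt nums k))
      = nums.length / 2 := by
    rw [bisect_countP _ _ (PySem.List.sorted_pairwise (losOf nums) (fun x => x))]
    rw [(PySem.List.sorted_perm (losOf nums) (fun x => x) false).countP_eq]
    unfold losOf
    rw [List.countP_map]
    have h1 : ((fun a => decide (a < t + 1)) ∘ loAt nums) = (fun k => decide (loAt nums k ≤ t)) := by
      funext k
      simp only [Function.comp_apply, decide_eq_decide]
      omega
    rw [h1]
    have h2 : (List.range (nums.length / 2)).countP (fun k => decide (t < loAt nums k))
        + (List.range (nums.length / 2)).countP (fun k => decide (loAt nums k ≤ t))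
        = nums.length / 2 := by
      simpa using (List.length_eq_countP_add_countP (p := fun k => decide (t < loAt nums k))
        (l := List.range (nums.length / 2))).symm
    omega
  have hhi : PySem.List.bisectLeft (PySem.List.sorted (hisOf nums limit) (fun x => x) false) t
      = (List.range (nums.length / 2)).countP (fun k => decide (hiAt nums limit k < t)) := by
    rw [bisect_countP _ _ (PySem.List.sorted_pairwise (hisOf nums limit) (fun x => x))]
    rw [(PySem.List.sorted_perm (hisOf nums limit) (fun x => x) false).countP_eq]
    unfold hisOf
    rw [List.countP_map]
    apply List.countP_congr
    intro k _
    simp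
  unfold bCost cOf
  rw [hhi]
  omega

lemma foldl_if_filter {α β : Type} (p : α → Prop) [DecidablePred p] (f : β → α → β) :
    ∀ (l : List α) (b : β),
      l.foldl (fun r x => if p x then f r x else r) b = (l.filter (fun x => decide (p x))).foldl f b := by
  intro l
  induction l with
  | nil => intro b; simp
  | cons x xs ih =>
    intro b
    by_cases h : p x <;> simp [h, ih]

lemma B_eval (nums : List Int) (limit : Int) (k0 : Int) (rest : List Int)
    (hkeys : PySem.Set.ofList (sumsOf nums) = k0 :: rest) :
    minMoves_slow_alt nums limit
      = ((k0 :: rest).filter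
          (fun k => decide (cOf nums k = maxAcc (cOf nums) (cOf nums k0) rest))).foldl
          (fun r k => min r (bCost nums limit k)) (nums.length : Int) := by
  have hbest : (PySem.List.max? (PySem.Dict.values (PySem.Dict.counter (sumsOf nums))) (fun x => x)).getD 0
      = maxAcc (cOf nums) (cOf nums k0) rest := by
    simp only [PySem.Dict.values, PySem.Dict.items_counter, hkeys, List.map_map]
    dsimp only [Function.comp_def]
    simp only [List.map_cons]
    rw [max?_cons]
    simp only [Option.getD_some]
    rw [List.foldl_map]
    unfold maxAcc cOf
    rfl
  simp only [minMoves_slow_alt, PySem.List.len_eq]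
  rw [bScan_eq nums limit]
  dsimp only
  rw [hbest]
  rw [PySem.Dict.items_counter, hkeys]
  rw [if_neg (by simp)]
  rw [foldl_if_filter]
  rw [List.filter_map]
  dsimp only [Function.comp_def]
  rw [List.foldl_map]
  dsimp only
  simp only [floordiv_cast]
  unfold bCost cOf
  rfl

lemma A_eval (nums : List Int) (limit : Int) (k0 : Int) (rest : List Int)
    (h2 : (nums.length : Int) ≠ 2)
    (hkeys : PySem.Set.ofList (sumsOf nums) = k0 :: rest) :
    minMoves_slow nums limit
      = ((k0 :: rest).filter
          (fun k => decide (cOf nums k = maxAcc (cOf nums) (cOf nums k0) rest))).foldl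
          (fun r k => min r (aCost nums limit ((nums.length : Int)) k)) (nums.length : Int) := by
  simp only [minMoves_slow, PySem.List.len_eq]
  rw [if_neg h2]
  rw [aDict_eq]
  have h1 : aSelect (PySem.Dict.counter (sumsOf nums))
      = (PySem.Dict.counter (sumsOf nums)).keys.foldl
          (selStep (fun k => (PySem.Dict.counter (sumsOf nums)).getD k 0)) [] := rfl
  have hc : (fun k => (PySem.Dict.counter (sumsOf nums)).getD k 0) = cOf nums := by
    funext k
    simp [PySem.Dict.getD_counter, cOf]
  rw [h1, PySem.Dict.keys_counter, hkeys, hc, sel_main]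

lemma empty_case (nums : List Int) (limit : Int)
    (h2 : (nums.length : Int) ≠ 2)
    (hkeys : PySem.Set.ofList (sumsOf nums) = []) :
    minMoves_slow nums limit = minMoves_slow_alt nums limit := by
  have hA : minMoves_slow nums limit = (nums.length : Int) := by
    simp only [minMoves_slow, PySem.List.len_eq]
    rw [if_neg h2, aDict_eq]
    have h1 : aSelect (PySem.Dict.counter (sumsOf nums))
        = (PySem.Dict.counter (sumsOf nums)).keys.foldl
            (selStep (fun k => (PySem.Dict.counter (sumsOf nums)).getD k 0)) [] := rfl
    rw [h1, PySem.Dict.keys_counter, hkeys]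
    rfl
  have hB : minMoves_slow_alt nums limit = (nums.length : Int) := by
    simp only [minMoves_slow_alt, PySem.List.len_eq]
    rw [bScan_eq nums limit]
    dsimp only
    rw [PySem.Dict.items_counter, hkeys]
    rfl
  rw [hA, hB]

lemma two_case (nums : List Int) (limit : Int) (h2 : nums.length = 2) :
    minMoves_slow_alt nums limit = 0 := by
  rcases nums with _ | ⟨a, tl⟩
  · simp at h2
  rcases tl with _ | ⟨b, tl2⟩
  · simp at h2
  rcases tl2 with _ | ⟨x, tl3⟩
  · clear h2
    have hsums : sumsOf [a, b] = [a + b] := by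
      simp [sumsOf, sumAt]
    have hkeys : PySem.Set.ofList (sumsOf [a, b]) = (a + b) :: [] := by
      rw [hsums]
      simp [PySem.Set.ofList, PySem.Set.add]
    rw [B_eval [a, b] limit (a + b) [] hkeys]
    have hpred : (decide (cOf [a, b] (a + b) = maxAcc (cOf [a, b]) (cOf [a, b] (a + b)) [])) = true := by
      simp [maxAcc]
    have hlos : PySem.List.sorted (losOf [a, b]) (fun x => x) false = [min (a + b) (min a b + 1)] := by
      have h : losOf [a, b] = [min (a + b) (min a b + 1)] := by
        simp [losOf, loAt, sumAt]
      rw [h]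
      exact PySem.List.sorted_eq_self_of_pairwise _ _ (List.pairwise_singleton _ _)
    have hhis : PySem.List.sorted (hisOf [a, b] limit) (fun x => x) false
        = [max (a + b) (max a b + limit)] := by
      have h : hisOf [a, b] limit = [max (a + b) (max a b + limit)] := by
        simp [hisOf, hiAt, sumAt]
      rw [h]
      exact PySem.List.sorted_eq_self_of_pairwise _ _ (List.pairwise_singleton _ _)
    have hcost : bCost [a, b] limit (a + b) = 0 := by
      unfold bCost
      rw [hlos, hhis]
      rw [bisect_countP _ _ (List.pairwise_singleton _ _), bisect_countP _ _ (List.pairwise_singleton _ _)]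
      have hc1 : cOf [a, b] (a + b) = 1 := by
        rw [cOf, hsums]
        simp
      rw [hc1]
      simp only [List.countP_cons, List.countP_nil]
      rw [decide_eq_true (show min (a + b) (min a b + 1) < a + b + 1 by omega)]
      rw [decide_eq_false (show ¬(max (a + b) (max a b + limit) < a + b) by omega)]
      norm_num
    simp only [List.filter_cons, hpred, List.filter_nil]
    rw [if_pos trivial]
    simp only [List.foldl_cons, List.foldl_nil, List.length_cons, List.length_nil, hcost]
    omega
  · simp at h2

-- ===== VERDICT (by name: the statement is the Claim_ definition above) =====
theorem minMoves_slow_spec : Claim_equal_minMoves_slow := by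
  intro nums limit _
  unfold Spec_minMoves_slow
  by_cases h2 : nums.length = 2
  · rw [two_case nums limit h2]
    unfold minMoves_slow
    rw [PySem.List.len_eq, h2]
    simp
  · have h2' : (nums.length : Int) ≠ 2 := by exact_mod_cast h2
    rcases hk : PySem.Set.ofList (sumsOf nums) with _ | ⟨k0, rest⟩
    · exact empty_case nums limit h2' hk
    · rw [A_eval nums limit k0 rest h2' hk, B_eval nums limit k0 rest hk]
      simp only [aCost_eq]
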